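-- pv_equiv track=rewrite | github.com/crunchywelch/sundial_greenlight | util/inventory_value.py | _series_from_sku
-- ===== SOURCE A (Python) =====
-- def _series_from_sku(sku):
--     """Derive series name from SKU prefix."""
--     prefixes = {
--         "SC-": "Studio Classic",
--         "SV-": "Studio Vocal",
--         "TC-": "Tour Classic",
--         "TV-": "Tour Vocal",
--     }
--     for prefix, name in prefixes.items():
--         if sku.startswith(prefix):
--             return name
--     return "Other"
-- ===== SOURCE B (Python) =====
-- def _series_from_sku(sku):
--     """Derive series name from SKU prefix."""
--     prefixes = {
--         "SC-": "Studio Classic",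
--         "SV-": "Studio Vocal",
--         "TC-": "Tour Classic",
--         "TV-": "Tour Vocal",
--     }
--     return prefixes.get(sku[:3], "Other")
-- ===== Notes on version B (the rewrite author's own statement) =====
-- stated objective: idiomatic
-- what changed: Replaces the loop over dict items with startswith tests by a single constant-time hash lookup of the fixed-width 3-char prefix slice with a default.
import Mathlib
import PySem

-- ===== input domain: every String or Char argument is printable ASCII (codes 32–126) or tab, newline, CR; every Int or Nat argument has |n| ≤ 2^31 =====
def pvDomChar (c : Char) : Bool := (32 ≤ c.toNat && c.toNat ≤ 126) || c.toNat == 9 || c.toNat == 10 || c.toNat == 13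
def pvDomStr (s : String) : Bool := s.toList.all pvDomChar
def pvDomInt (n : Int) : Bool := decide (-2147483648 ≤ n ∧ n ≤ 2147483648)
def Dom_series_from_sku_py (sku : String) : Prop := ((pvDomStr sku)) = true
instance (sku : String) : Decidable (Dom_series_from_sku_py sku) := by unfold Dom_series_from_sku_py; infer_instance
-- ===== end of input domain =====

-- ===== PORT A =====
-- B replaces the loop of startswith tests by one hash lookup of the 3-char prefix slice (idiomatic).
def series_from_sku_loop (sku : String) : List (String × String) → String
  | [] => "Other"
  | (prefix_, name) :: rest =>
      if PySem.Str.startswith sku prefix_ then name else series_from_sku_loop sku rest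

def series_from_sku_py (sku : String) : String :=
  let prefixes : List (String × String) :=
    [("SC-", "Studio Classic"), ("SV-", "Studio Vocal"),
     ("TC-", "Tour Classic"), ("TV-", "Tour Vocal")]
  series_from_sku_loop sku prefixes

-- ===== PORT B =====
def series_from_sku_py_alt (sku : String) : String :=
  let prefixes : PySem.Dict String String :=
    PySem.Dict.ofList
      [("SC-", "Studio Classic"), ("SV-", "Studio Vocal"),
       ("TC-", "Tour Classic"), ("TV-", "Tour Vocal")]
  prefixes.getD (PySem.Str.slice sku none (some 3)) "Other"

-- ===== PRECONDITION & SPEC =====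
def Spec_series_from_sku_py (sku : String) (out : String) : Prop := out = series_from_sku_py_alt sku
instance (sku : String) (out : String) : Decidable (Spec_series_from_sku_py sku out) := by unfold Spec_series_from_sku_py; infer_instance

-- ===== CLAIM (what is proved, stated in full; the proofs are below) =====
def Claim_equal_series_from_sku_py : Prop := ∀ (sku : String), Dom_series_from_sku_py sku → Spec_series_from_sku_py sku (series_from_sku_py sku)

-- ===== LEMMAS AND PROOFS =====

-- startswith by a 3-char prefix is equality of the first-3-chars slice with that prefix
theorem startswith_three (sku : String) (p : List Char) (hp : p.length = 3) :
    PySem.Chars.startswith sku.toList p = decide (sku.toList.take 3 = p) := by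
  by_cases h : sku.toList.take 3 = p
  · have hpre : p <+: sku.toList := h ▸ List.take_prefix 3 sku.toList
    simp [h, (PySem.Chars.startswith_iff _ _).mpr hpre]
  · simp only [h, decide_false]
    rw [Bool.eq_false_iff]
    intro hc
    have hpre := (PySem.Chars.startswith_iff _ _).mp hc
    rw [List.prefix_iff_eq_take, hp] at hpre
    exact h hpre.symm

theorem strBeq_eq_decide (s t : String) : (s == t) = decide (s = t) := by
  cases instDecidableEqString s t <;> simp_all

-- ===== VERDICT (by name: the statement is the Claim_ definition above) =====
theorem series_from_sku_py_spec : Claim_equal_series_from_sku_py := by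
  intro sku _
  unfold Spec_series_from_sku_py series_from_sku_py series_from_sku_py_alt
  have hslice : (PySem.Str.slice sku none (some 3)).toList = sku.toList.take 3 := by
    rw [PySem.Str.toList_slice, PySem.Chars.slice_eq_listSlice]
    have := PySem.List.slice_to sku.toList (b := 3) (by omega)
    simpa using this
  have hkey : ∀ (p : String), (p == PySem.Str.slice sku none (some 3)) = decide (sku.toList.take 3 = p.toList) := by
    intro p
    rw [strBeq_eq_decide]
    by_cases h : sku.toList.take 3 = p.toList
    · have he : p = PySem.Str.slice sku none (some 3) :=
        String.toList_injective (by rw [hslice, h])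
      simp [h, he]
    · have hne : ¬ p = PySem.Str.slice sku none (some 3) := by
        intro he; exact h (by rw [he, hslice])
      simp [h, hne]
  have hdict : PySem.Dict.ofList
      [("SC-", "Studio Classic"), ("SV-", "Studio Vocal"),
       ("TC-", "Tour Classic"), ("TV-", "Tour Vocal")] =
      PySem.Dict.mk
      [("SC-", "Studio Classic"), ("SV-", "Studio Vocal"),
       ("TC-", "Tour Classic"), ("TV-", "Tour Vocal")] := by decide
  simp only [series_from_sku_loop, PySem.Str.startswith_eq,
    startswith_three sku _ (by decide : ("SC-".toList).length = 3),
    startswith_three sku _ (by decide : ("SV-".toList).length = 3),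
    startswith_three sku _ (by decide : ("TC-".toList).length = 3),
    startswith_three sku _ (by decide : ("TV-".toList).length = 3),
    hdict, PySem.Dict.getD, PySem.Dict.get?_mk_cons, hkey]
  split_ifs <;> simp_all [PySem.Dict.get?]
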